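-- pv_equiv track=rewrite | github.com/OnjoujiToki/Common-pattern-games-AI-implmentation | tilepuzzle.py | generateright
-- ===== SOURCE A (Python) =====
-- from copy import copy, deepcopy
--
-- def generateright(currState):
--     result = []
--     if findEmptyPos(currState)[1] == 2:  ## 0 is in the third col...
--         return result
--     original = deepcopy(currState)
--     for i in range(len(currState)):
--         for j in range(len(currState[0])):
--             if currState[i][j] == 0:
--                 m = i
--                 n = j
--                 a = currState[i][j + 1]
--                 original[i][j] = a
--     original[m][n + 1] = 0
--
--     result.append(original)
--     return result
--
-- def findEmptyPos(currState):
--     for i, e in enumerate(currState):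
--         try:
--             return [i, e.index(0)]
--         except ValueError:
--             pass
--     raise ValueError("{!r} is not in list".format(0))
-- ===== SOURCE B (Python) =====
-- def generateright(currState):
--     # Purely recursive structural rewrite: no indices into the grid, no deepcopy,
--     # no mutation -- rebuild the row list, rewriting the blank's row on the way.
--
--     def slide_row(row, col):
--         # row[0] is the cell at column col of the blank's row.
--         # Rewrites the first [0, a] into [a, 0]; None means the blank sits in
--         # the third column, so there is no move to the right.
--         if row[0] == 0:
--             return None if col == 2 else [row[1], 0] + row[2:]
--         tail = slide_row(row[1:], col + 1)
--         return None if tail is None else [row[0]] + tail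
--
--     def slide(rows):
--         if not rows:
--             raise ValueError("{!r} is not in list".format(0))
--         if 0 in rows[0]:
--             new = slide_row(rows[0], 0)
--             return None if new is None else [new] + rows[1:]
--         rest = slide(rows[1:])
--         return None if rest is None else [rows[0]] + rest
--
--     new = slide(currState)
--     return [] if new is None else [new]
-- ===== Notes on version B (the rewrite author's own statement) =====
-- stated objective: alternative
-- what changed: B is a pure structural recursion that rebuilds the row list, rewriting the first [0,a] cell pattern into [a,0] inside the blank's row, with no grid indices, no deepcopy, no mutation and no rescan, where A deepcopies and runs an index-bounded nested double loop over the whole grid followed by two in-place writes.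
-- outside the precondition, e.g. on generateright([[0, 1, 2], [0, 1, 2]]): A returns [[[1, 1, 2], [1, 0, 2]]], B returns [[[1, 0, 2], [0, 1, 2]]]
import Mathlib
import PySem

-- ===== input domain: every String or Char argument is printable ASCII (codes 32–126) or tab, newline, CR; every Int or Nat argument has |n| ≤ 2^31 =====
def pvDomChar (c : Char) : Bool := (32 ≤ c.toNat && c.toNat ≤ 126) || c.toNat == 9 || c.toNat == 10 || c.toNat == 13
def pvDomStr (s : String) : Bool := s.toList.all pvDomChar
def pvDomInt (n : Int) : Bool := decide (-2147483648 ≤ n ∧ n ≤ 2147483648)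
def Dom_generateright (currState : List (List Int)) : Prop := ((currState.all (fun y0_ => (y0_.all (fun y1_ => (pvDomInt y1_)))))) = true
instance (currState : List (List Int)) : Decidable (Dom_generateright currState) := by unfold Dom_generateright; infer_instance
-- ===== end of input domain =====

-- B replaces A's deepcopy + index-bounded nested rescan + in-place writes with a pure structural
-- recursion that rebuilds the row list, rewriting the first [0, a] cell pattern into [a, 0]
-- (objective: alternative; return value only, A never mutates its argument).


-- ===== PORT A =====
-- findEmptyPos: first row containing 0, with 0's first index there; none = the final ValueError.
def pvFindEmptyPos : List (List Int) → Nat → Option (Nat × Nat)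
  | [], _ => none
  | e :: rest, i =>
    match PySem.List.index? e (0 : Int) with
    | some j => some (i, j)
    | none => pvFindEmptyPos rest (i + 1)

-- Inner 'for j in range(len(currState[0]))' for row i of A's rescan: o is original's row i
-- (deepcopy starts equal to the row), n? the column of the last 0 seen in this row;
-- none = IndexError (currState[i][j] or currState[i][j+1] out of range).
def pvScanRow (row : List Int) : List Nat → List Int → Option Nat → Option (List Int × Option Nat)
  | [], o, n? => some (o, n?)
  | j :: js, o, n? =>
    match PySem.List.pyGet? row (j : Int) with
    | none => none
    | some v =>
      if v = 0 then
        match PySem.List.pyGet? row ((j : Int) + 1) with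
        | none => none
        | some a => pvScanRow row js (o.set j a) (some j)
      else pvScanRow row js o n?

-- Outer 'for i in range(len(currState))': acc are original's rows already scanned,
-- mn the (m, n) of the last 0 found so far.
def pvScanRows (w : Nat) : List (List Int) → Nat → List (List Int) → Option (Nat × Nat) → Option (List (List Int) × Option (Nat × Nat))
  | [], _, acc, mn => some (acc, mn)
  | row :: rest, i, acc, mn =>
    match pvScanRow row (List.range w) row none with
    | none => none
    | some (o, some n) => pvScanRows w rest (i + 1) (acc ++ [o]) (some (i, n))
    | some (o, none) => pvScanRows w rest (i + 1) (acc ++ [o]) mn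

def generateright (currState : List (List Int)) : List (List (List Int)) :=
  match pvFindEmptyPos currState 0 with
  | none => []                      -- findEmptyPos raises ValueError; outside Pre_
  | some (_, n0) =>
    if n0 = 2 then []               -- 0 is in the third col
    else
      match pvScanRows ((currState.headD []).length) currState 0 [] none with
      | none => []                  -- IndexError inside the rescan; outside Pre_
      | some (_, none) => []        -- no 0 scanned: 'm' unbound, NameError; outside Pre_
      | some (orig, some (m, n)) =>
        -- original[m][n + 1] = 0  (List.set is exact here: the bound is checked first;
        -- out of range = IndexError, outside Pre_)
        if n + 1 < (orig.getD m []).length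
        then [orig.modify m (fun r => r.set (n + 1) 0)]
        else []

-- ===== PORT B =====
-- slide_row: walks the blank's row cell by cell; outer none = IndexError (row[0] or row[1]
-- out of range; outside Pre_), inner none = the blank sits in the third column.
def pvSlideRow : List Int → Nat → Option (Option (List Int))
  | [], _ => none
  | x :: rest, col =>
    if x = 0 then
      if col = 2 then some none
      else match rest with
        | [] => none
        | a :: rest' => some (some (a :: 0 :: rest'))
    else (pvSlideRow rest (col + 1)).map (Option.map (x :: ·))

-- slide: recursion over the rows; outer none = an exception (ValueError at the end, or an
-- IndexError from slide_row; both outside Pre_), inner none = move blocked.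
def pvSlide : List (List Int) → Option (Option (List (List Int)))
  | [] => none
  | row :: rest =>
    if (0 : Int) ∈ row then
      (pvSlideRow row 0).map (Option.map (· :: rest))
    else (pvSlide rest).map (Option.map (row :: ·))

def generateright_alt (currState : List (List Int)) : List (List (List Int)) :=
  match pvSlide currState with
  | none => []                      -- B raises; outside Pre_
  | some none => []
  | some (some g) => [g]

-- ===== PRECONDITION & SPEC =====
-- Pre_ asks: some row contains 0, and (unless the first 0 sits in column 2, where both return [])
-- the cells A's rescan visits (columns < len(currState[0])) hold exactly one 0 — the
-- first 0 — with its right neighbour in range and every row at least len(currState[0]) long.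
-- It thereby excludes inputs where A raises (no 0 / IndexError / NameError) and, although A still
-- returns there, grids with several scanned 0s, whose partially-swapped last-match result is an
-- accident of A's loop, and grids whose first 0 lies beyond the scanned columns while another 0
-- is scanned, where A's guard and loop disagree.
def Pre_generateright (currState : List (List Int)) : Prop :=
  (currState.find? (fun r => decide ((0 : Int) ∈ r))).isSome = true ∧
  (let r := (currState.find? (fun r => decide ((0 : Int) ∈ r))).getD [];
   let w := (currState.headD []).length;
   r.idxOf 0 = 2 ∨
     ((currState.map (fun r' => (r'.take w).count 0)).sum = 1 ∧
      r.idxOf 0 < w ∧ r.idxOf 0 + 1 < r.length ∧ ∀ r' ∈ currState, w ≤ r'.length))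
instance (currState : List (List Int)) : Decidable (Pre_generateright currState) := by
  unfold Pre_generateright; infer_instance

def pvWitness_generateright : List (List Int) := [[1, 0, 2], [3, 4, 5], [6, 7, 8]]

def Spec_generateright (currState : List (List Int)) (out : List (List (List Int))) : Prop := out = generateright_alt currState
instance (currState : List (List Int)) (out : List (List (List Int))) : Decidable (Spec_generateright currState out) := by unfold Spec_generateright; infer_instance

-- ===== CLAIM (what is proved, stated in full; the proofs are below) =====
def Claim_equal_generateright : Prop := ∀ (currState : List (List Int)), Dom_generateright currState → Pre_generateright currState → Spec_generateright currState (generateright currState)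

-- ===== LEMMAS AND PROOFS =====

-- proof-only helper: first row containing 0 with 0's index there (characterises both ports' search)
def pvBFind : List (List Int) → Nat → Option (Nat × Nat)
  | [], _ => none
  | row :: rest, m => if (0 : Int) ∈ row then some (m, row.idxOf 0) else pvBFind rest (m + 1)

-- idxOf glue
lemma getElem_ne_of_lt_idxOf (l : List Int) (j : Nat) (hjl : j < l.length)
    (hj : j < l.idxOf 0) : l[j] ≠ 0 := by
  have := List.not_of_lt_findIdx (p := (· == (0 : Int))) (xs := l) (i := j) hj
  simpa using this

lemma idxOf?_of_mem (l : List Int) (h : (0 : Int) ∈ l) :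
    List.idxOf? 0 l = some (l.idxOf 0) := by
  rw [List.idxOf?_eq_some_iff]
  exact ⟨List.idxOf_lt_length_of_mem h, List.getElem_idxOf _,
    fun j hj => getElem_ne_of_lt_idxOf l j
      (by have := List.idxOf_lt_length_of_mem h; omega) hj⟩

-- A's findEmptyPos agrees with the first-0 search.
lemma find_eq_bFind (c : List (List Int)) : ∀ i, pvFindEmptyPos c i = pvBFind c i := by
  induction c with
  | nil => intro i; rfl
  | cons e rest ih =>
    intro i
    simp only [pvFindEmptyPos, pvBFind, PySem.List.index?_eq_idxOf?]
    by_cases h : (0 : Int) ∈ e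
    · rw [idxOf?_of_mem e h]; simp [h]
    · rw [List.idxOf?_eq_none_iff.mpr h]; simp [h, ih]

lemma bFind_none_iff (c : List (List Int)) : ∀ i, pvBFind c i = none ↔ ∀ q ∈ c, (0 : Int) ∉ q := by
  induction c with
  | nil => intro i; simp [pvBFind]
  | cons row rest ih =>
    intro i
    simp only [pvBFind]
    by_cases h : (0 : Int) ∈ row
    · simp [h]
    · simp [h, ih (i + 1)]

lemma bFind_some (c : List (List Int)) : ∀ i m n, pvBFind c i = some (m, n) →
    ∃ pre r suf, c = pre ++ r :: suf ∧ i + pre.length = m ∧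
      (∀ q ∈ pre, (0 : Int) ∉ q) ∧ (0 : Int) ∈ r ∧ r.idxOf 0 = n := by
  induction c with
  | nil => intro i m n h; simp [pvBFind] at h
  | cons row rest ih =>
    intro i m n h
    simp only [pvBFind] at h
    by_cases hr : (0 : Int) ∈ row
    · simp only [if_pos hr, Option.some.injEq, Prod.mk.injEq] at h
      exact ⟨[], row, rest, by simp, by simp [h.1], by simp, hr, h.2⟩
    · rw [if_neg hr] at h
      obtain ⟨pre, r, suf, hc, hm, hpre, hr0, hn⟩ := ih (i + 1) m n h
      refine ⟨row :: pre, r, suf, by simp [hc], by simp; omega, ?_, hr0, hn⟩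
      intro q hq
      rcases List.mem_cons.mp hq with h1 | h1
      · exact h1 ▸ hr
      · exact hpre q h1

lemma scanRow_append (row : List Int) (l1 l2 : List Nat) : ∀ o n?,
    pvScanRow row (l1 ++ l2) o n?
      = (pvScanRow row l1 o n?).bind (fun s => pvScanRow row l2 s.1 s.2) := by
  induction l1 with
  | nil => intro o n?; rfl
  | cons j js ih =>
    intro o n?
    simp only [List.cons_append, pvScanRow]
    cases PySem.List.pyGet? row (j : Int) with
    | none => rfl
    | some v =>
      by_cases hv : v = 0
      · simp only [if_pos hv]
        cases PySem.List.pyGet? row ((j : Int) + 1) with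
        | none => rfl
        | some a => simp [ih]
      · simp [if_neg hv, ih]

lemma scanRow_nozero (row : List Int) : ∀ (js : List Nat) o n?,
    (∀ j ∈ js, ∃ (hj : j < row.length), row[j] ≠ 0) →
    pvScanRow row js o n? = some (o, n?) := by
  intro js
  induction js with
  | nil => intro o n? _; rfl
  | cons j js ih =>
    intro o n? h
    obtain ⟨hj, hne⟩ := h j (by simp)
    simp only [pvScanRow, PySem.List.pyGet?_natCast, List.getElem?_eq_getElem hj]
    simp only [if_neg hne]
    exact ih o n? (fun j hjm => h j (by simp [hjm]))

lemma scanRow_zero_row (r : List Int) (w n : Nat) (hw : w ≤ r.length) (hnw : n < w)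
    (hn1 : n + 1 < r.length) (hz : r[n]'(by omega) = 0)
    (hu : ∀ j, (hj : j < w) → j ≠ n → r[j]'(by omega) ≠ 0) :
    pvScanRow r (List.range w) r none = some (r.set n (r[n + 1]'hn1), some n) := by
  have hsplit : List.range w
      = (List.range n ++ [n]) ++ (List.range (w - (n + 1))).map ((n + 1) + ·) := by
    rw [← List.range_succ, ← List.range_add]
    congr 1
    omega
  rw [hsplit, scanRow_append, scanRow_append]
  rw [scanRow_nozero r (List.range n) r none (fun j hj => by
    have hjn : j < n := List.mem_range.mp hj
    exact ⟨by omega, hu j (by omega) (by omega)⟩)]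
  simp only [Option.bind_some]
  have hstep : pvScanRow r [n] r none = some (r.set n (r[n + 1]'hn1), some n) := by
    simp only [pvScanRow, PySem.List.pyGet?_natCast, List.getElem?_eq_getElem (show n < r.length by omega)]
    rw [if_pos hz]
    have hcast : ((n : Int) + 1) = ((n + 1 : Nat) : Int) := by push_cast; ring
    rw [hcast, PySem.List.pyGet?_natCast, List.getElem?_eq_getElem hn1]
  rw [hstep]
  simp only [Option.bind_some]
  exact scanRow_nozero r _ _ _ (fun j hj => by
    obtain ⟨t, ht, rfl⟩ := List.mem_map.mp hj
    have htw : t < w - (n + 1) := List.mem_range.mp ht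
    exact ⟨by omega, hu (n + 1 + t) (by omega) (by omega)⟩)

lemma scanRows_suffix (w : Nat) (l : List (List Int)) : ∀ i acc mn,
    (∀ row ∈ l, ∀ j, (hj : j < w) → ∃ (h : j < row.length), row[j] ≠ 0) →
    pvScanRows w l i acc mn = some (acc ++ l, mn) := by
  induction l with
  | nil => intro i acc mn _; simp [pvScanRows]
  | cons row rest ih =>
    intro i acc mn h
    simp only [pvScanRows, scanRow_nozero row (List.range w) row none
      (fun j hj => h row (by simp) j (List.mem_range.mp hj))]
    rw [ih (i + 1) (acc ++ [row]) mn (fun q hq => h q (by simp [hq]))]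
    simp

lemma scanRows_prefix (w : Nat) (pre : List (List Int)) : ∀ rest i acc mn,
    (∀ row ∈ pre, ∀ j, (hj : j < w) → ∃ (h : j < row.length), row[j] ≠ 0) →
    pvScanRows w (pre ++ rest) i acc mn = pvScanRows w rest (i + pre.length) (acc ++ pre) mn := by
  induction pre with
  | nil => intro rest i acc mn _; simp
  | cons row pre ih =>
    intro rest i acc mn h
    simp only [List.cons_append, pvScanRows, scanRow_nozero row (List.range w) row none
      (fun j hj => h row (by simp) j (List.mem_range.mp hj))]
    rw [ih rest (i + 1) (acc ++ [row]) mn (fun q hq => h q (by simp [hq]))]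
    have h1 : i + 1 + pre.length = i + (row :: pre).length := by simp; omega
    have h2 : acc ++ [row] ++ pre = acc ++ row :: pre := by simp
    rw [h1, h2]

-- grid surgery facts
lemma set_set_row (r : List Int) : ∀ (n : Nat) (a : Int), n + 1 < r.length →
    (r.set n a).set (n + 1) 0 = r.take n ++ a :: 0 :: r.drop (n + 2) := by
  induction r with
  | nil => intro n a h; simp at h
  | cons x t ih =>
    intro n a h
    cases n with
    | zero =>
      cases t with
      | nil => simp at h
      | cons y t' => simp [List.set]
    | succ n =>
      simp only [List.set_cons_succ, List.take_succ_cons, List.drop_succ_cons, List.cons_append]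
      rw [← ih n a (by simpa using h)]

lemma modify_append_length (pre : List (List Int)) (x : List Int) (suf : List (List Int))
    (f : List Int → List Int) : (pre ++ x :: suf).modify pre.length f = pre ++ f x :: suf := by
  induction pre with
  | nil => rfl
  | cons q pre ih => simp only [List.length_cons, List.cons_append, List.modify_succ_cons, ih]

lemma getD_append_length (pre : List (List Int)) (x : List Int) (suf : List (List Int)) :
    (pre ++ x :: suf).getD pre.length [] = x := by
  induction pre with
  | nil => rfl
  | cons q pre ih => exact ih

-- B-side: slide_row skips a nonzero prefix
lemma slideRow_skip (t : List Int) : ∀ (u : List Int) (col : Nat), (∀ x ∈ t, x ≠ 0) →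
    pvSlideRow (t ++ u) col = (pvSlideRow u (col + t.length)).map (Option.map (t ++ ·)) := by
  induction t with
  | nil =>
    intro u col _
    simp only [List.nil_append, List.length_nil, Nat.add_zero]
    cases h : pvSlideRow u col with
    | none => simp
    | some o => cases o <;> simp
  | cons x t ih =>
    intro u col h
    have hx : x ≠ 0 := h x (by simp)
    simp only [List.cons_append, pvSlideRow, if_neg hx]
    rw [ih u (col + 1) (fun y hy => h y (by simp [hy]))]
    have harith : col + 1 + t.length = col + (x :: t).length := by simp; omega
    rw [harith]
    cases pvSlideRow u (col + (x :: t).length) with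
    | none => simp
    | some o => cases o <;> simp

-- B-side: slide leaves zero-free leading rows unchanged
lemma slide_skip (pre : List (List Int)) : ∀ (l : List (List Int)), (∀ q ∈ pre, (0 : Int) ∉ q) →
    pvSlide (pre ++ l) = (pvSlide l).map (Option.map (pre ++ ·)) := by
  induction pre with
  | nil =>
    intro l _
    cases h : pvSlide l with
    | none => simp [h]
    | some o => cases o <;> simp [h]
  | cons q pre ih =>
    intro l h
    have hq : (0 : Int) ∉ q := h q (by simp)
    simp only [List.cons_append, pvSlide, if_neg hq]
    rw [ih l (fun p hp => h p (by simp [hp]))]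
    cases pvSlide l with
    | none => simp
    | some o => cases o <;> simp

-- uniqueness of the scanned zero, extracted from the counts in Pre_
lemma count_take_split (r : List Int) (w n : Nat) (hnw : n < w) (hw : w ≤ r.length)
    (hz : r[n]'(by omega) = 0) (hc : (r.take w).count 0 = 1) :
    ∀ j, (hj : j < w) → j ≠ n → r[j]'(by omega) ≠ 0 := by
  intro j hj hne h0
  have hlt : (r.take w).length = w := by simp [List.length_take]; omega
  have hsplit : r.take w = (r.take w).take n ++ (r.take w)[n]'(by omega) :: (r.take w).drop (n + 1) := by
    rw [List.getElem_cons_drop, List.take_append_drop]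
  have htn : (r.take w)[n]'(by omega) = 0 := by
    rw [List.getElem_take]; exact hz
  rw [hsplit, htn] at hc
  simp only [List.count_append, List.count_cons_self] at hc
  have hc1 : ((r.take w).take n).count 0 = 0 := by omega
  have hc2 : ((r.take w).drop (n + 1)).count 0 = 0 := by omega
  rcases Nat.lt_or_ge j n with hlt2 | hge
  · have : (0 : Int) ∈ (r.take w).take n := by
      have he : ((r.take w).take n)[j]'(by simp [hlt]; omega) = 0 := by
        rw [List.getElem_take, List.getElem_take]; exact h0
      exact he ▸ List.getElem_mem _
    rw [List.count_eq_zero] at hc1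
    exact hc1 this
  · have hgt : n + 1 ≤ j := by omega
    have : (0 : Int) ∈ (r.take w).drop (n + 1) := by
      have he : ((r.take w).drop (n + 1))[j - (n + 1)]'(by simp [hlt]; omega) = 0 := by
        rw [List.getElem_drop, List.getElem_take]
        have : n + 1 + (j - (n + 1)) = j := by omega
        simp only [this]
        exact h0
      exact he ▸ List.getElem_mem _
    rw [List.count_eq_zero] at hc2
    exact hc2 this

-- decompose the blank's row around its first 0
lemma row_decomp (r : List Int) (n : Nat) (hn : r.idxOf 0 = n) (hlt : n < r.length) :
    r = r.take n ++ 0 :: r.drop (n + 1) ∧ ∀ x ∈ r.take n, x ≠ 0 := by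
  have hz : r[n]'hlt = 0 := by
    have hm : (0 : Int) ∈ r := by
      by_contra hmem
      rw [List.idxOf_eq_length_iff.mpr hmem] at hn
      omega
    have h := List.getElem_idxOf (x := (0 : Int)) (xs := r) (List.idxOf_lt_length_of_mem hm)
    simpa [hn] using h
  constructor
  · conv_lhs => rw [← List.take_append_drop n r]
    congr 1
    rw [List.drop_eq_getElem_cons (by omega), hz]
  · intro x hx
    obtain ⟨j, hj, rfl⟩ := List.getElem_of_mem hx
    have hjl : (r.take n).length = min n r.length := List.length_take ..
    rw [List.getElem_take]
    exact getElem_ne_of_lt_idxOf r j (by omega) (by omega)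

-- ===== VERDICT (by name: the statement is the Claim_ definition above) =====
theorem generateright_spec : Claim_equal_generateright := by
  intro c _ hpre
  unfold Spec_generateright
  obtain ⟨hsome, hrest⟩ := hpre
  cases hfb : pvBFind c 0 with
  | none =>
    rw [bFind_none_iff c 0] at hfb
    rw [List.find?_eq_none.mpr (by intro x hx; simpa using hfb x hx)] at hsome
    simp at hsome
  | some p =>
    obtain ⟨m, n⟩ := p
    obtain ⟨pre, r, suf, hc, hm, hpre0, hr0, hn⟩ := bFind_some c 0 m n hfb
    have hm' : pre.length = m := by omega
    subst hm'
    have hfind : c.find? (fun r => decide ((0 : Int) ∈ r)) = some r := by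
      rw [hc, List.find?_append]
      rw [List.find?_eq_none.mpr (by intro x hx; simp [hpre0 x hx])]
      simp [hr0]
    rw [hfind] at hrest
    simp only [Option.getD_some] at hrest
    unfold generateright generateright_alt
    rw [find_eq_bFind c 0, hfb]
    by_cases hn2 : n = 2
    · -- blank in the third column: A returns [] at once, B's slide returns the inner none
      subst hn2
      have hlt : 2 < r.length := hn ▸ List.idxOf_lt_length_of_mem hr0
      obtain ⟨hdec, htz⟩ := row_decomp r 2 hn hlt
      rw [show c = pre ++ r :: suf from hc]
      rw [slide_skip pre (r :: suf) hpre0]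
      simp only [pvSlide, if_pos hr0]
      conv_rhs => rw [hdec]
      rw [slideRow_skip (r.take 2) (0 :: r.drop 3) 0 htz]
      have hl2 : (r.take 2).length = 2 := by simp [List.length_take]; omega
      simp [pvSlideRow, hl2]
    · simp only [if_neg hn2]
      rcases hrest with h2 | ⟨hsum, hnw, hn1, hlen⟩
      · exact absurd (hn ▸ h2) hn2
      rw [hn] at hnw hn1
      set w := (c.headD []).length with hwdef
      have hz : r[n]'(by omega) = 0 := by
        have h := List.getElem_idxOf (x := (0 : Int)) (xs := r) (List.idxOf_lt_length_of_mem hr0)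
        simp only [hn] at h
        exact h
      have hwr : w ≤ r.length := hlen r (by rw [hc]; simp)
      have hmem : (0 : Int) ∈ r.take w := by
        have he : (r.take w)[n]'(by simp [List.length_take]; omega) = 0 := by
          rw [List.getElem_take]; exact hz
        exact he ▸ List.getElem_mem _
      have hsum' := hsum
      rw [hc] at hsum'
      simp only [List.map_append, List.map_cons, List.sum_append, List.sum_cons] at hsum'
      have hcr1 : (r.take w).count 0 = 1 := by
        have := List.count_pos_iff.mpr hmem
        omega
      have hpreC : (pre.map (fun r' => (r'.take w).count 0)).sum = 0 := by omega
      have hsufC : (suf.map (fun r' => (r'.take w).count 0)).sum = 0 := by omega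
      have hZF : ∀ q, q ∈ pre ∨ q ∈ suf → ∀ j, (hj : j < w) → ∃ (h : j < q.length), q[j] ≠ 0 := by
        intro q hq j hj
        have hqc : q ∈ c := by rw [hc]; rcases hq with h | h <;> simp [h]
        have hql : w ≤ q.length := hlen q hqc
        have hcnt : (q.take w).count 0 = 0 := by
          rcases hq with h | h
          · exact List.sum_eq_zero_iff.mp hpreC _ (List.mem_map.mpr ⟨q, h, rfl⟩)
          · exact List.sum_eq_zero_iff.mp hsufC _ (List.mem_map.mpr ⟨q, h, rfl⟩)
        refine ⟨by omega, ?_⟩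
        intro h0
        rw [List.count_eq_zero] at hcnt
        exact hcnt (by
          have he : (q.take w)[j]'(by simp [List.length_take]; omega) = 0 := by
            rw [List.getElem_take]; exact h0
          exact he ▸ List.getElem_mem _)
      have hu := count_take_split r w n hnw hwr hz hcr1
      -- A's side
      rw [show c = pre ++ r :: suf from hc]
      rw [scanRows_prefix w pre (r :: suf) 0 [] none (fun row hrow => hZF row (Or.inl hrow))]
      simp only [List.nil_append, Nat.zero_add, pvScanRows,
        scanRow_zero_row r w n hwr hnw hn1 hz hu]
      rw [scanRows_suffix w suf (pre.length + 1) (pre ++ [r.set n (r[n + 1]'hn1)])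
        (some (pre.length, n)) (fun row hrow => hZF row (Or.inr hrow))]
      simp only [List.append_assoc, List.singleton_append]
      rw [getD_append_length pre (r.set n (r[n + 1]'hn1)) suf]
      rw [if_pos (by simp; omega)]
      rw [modify_append_length pre (r.set n (r[n + 1]'hn1)) suf]
      rw [set_set_row r n (r[n + 1]'hn1) hn1]
      -- B's side
      obtain ⟨hdec, htz⟩ := row_decomp r n hn (by omega)
      have hdrop : r.drop (n + 1) = (r[n + 1]'hn1) :: r.drop (n + 2) :=
        List.drop_eq_getElem_cons hn1
      rw [slide_skip pre (r :: suf) hpre0]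
      simp only [pvSlide, if_pos hr0]
      conv_rhs => rw [hdec, hdrop]
      rw [slideRow_skip (r.take n) (0 :: (r[n + 1]'hn1) :: r.drop (n + 2)) 0 htz]
      have hln : (r.take n).length = n := by simp [List.length_take]; omega
      simp [pvSlideRow, hln, hn2]
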